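-- pv_equiv track=rewrite | github.com/zty123456/modeling | python/zrt/ir/types.py | split_shape_list
-- ===== SOURCE A (Python) =====
-- def split_shape_list(s: str) -> list[str]:
--     """Split '[1, 128], [7168]' → ['[1, 128]', '[7168]'].
--
--     Handles nested brackets correctly.
--     """
--     if not s:
--         return []
--     result: list[str] = []
--     depth = 0
--     current: list[str] = []
--     for ch in s:
--         if ch == "[":
--             depth += 1
--             current.append(ch)
--         elif ch == "]":
--             depth -= 1
--             current.append(ch)
--         elif ch == "," and depth == 0:
--             token = "".join(current).strip()
--             if token:
--                 result.append(token)
--             current = []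
--         else:
--             current.append(ch)
--     token = "".join(current).strip()
--     if token:
--         result.append(token)
--     return result
-- ===== SOURCE B (Python) =====
-- def split_shape_list(s: str) -> list[str]:
--     """Split '[1, 128], [7168]' -> ['[1, 128]', '[7168]'] via top-level comma positions."""
--     depth = 0
--     cuts = []
--     for i, ch in enumerate(s):
--         if ch == "[":
--             depth += 1
--         elif ch == "]":
--             depth -= 1
--         elif ch == "," and depth == 0:
--             cuts.append(i)
--     result = []
--     prev = -1
--     for c in cuts + [len(s)]:
--         tok = s[prev + 1:c].strip()
--         if tok:
--             result.append(tok)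
--         prev = c
--     return result
-- ===== Notes on version B (the rewrite author's own statement) =====
-- stated objective: alternative
-- what changed: Instead of accumulating a per-token character buffer in one pass, B first records the indices of all depth-0 commas, then slices the original string between consecutive boundaries, stripping and dropping empty segments.
import Mathlib
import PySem

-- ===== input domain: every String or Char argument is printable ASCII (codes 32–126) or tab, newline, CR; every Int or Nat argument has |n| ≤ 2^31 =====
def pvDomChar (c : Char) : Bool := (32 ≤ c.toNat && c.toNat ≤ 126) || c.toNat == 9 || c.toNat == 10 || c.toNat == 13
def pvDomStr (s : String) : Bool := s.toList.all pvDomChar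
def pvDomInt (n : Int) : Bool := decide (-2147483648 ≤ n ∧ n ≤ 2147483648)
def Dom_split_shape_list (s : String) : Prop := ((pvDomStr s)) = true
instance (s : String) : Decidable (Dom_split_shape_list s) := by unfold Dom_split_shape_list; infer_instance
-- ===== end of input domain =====

-- B replaces A's per-token character buffer by a two-pass scheme (record top-level comma
-- positions, then slice the original string between them); same cost, alternative structure.

-- ===== PORT A =====
-- loop body of A's single pass: state = (result, depth, current char buffer)
def pvStepA (st : List String × Int × List Char) (ch : Char) : List String × Int × List Char :=
  let (result, depth, current) := st
  if ch = '[' then (result, depth + 1, current ++ [ch])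
  else if ch = ']' then (result, depth - 1, current ++ [ch])
  else if ch = ',' ∧ depth = 0 then
    let token := PySem.Chars.strip current            -- "".join(current).strip(), on code points
    ((if token ≠ [] then result ++ [String.ofList token] else result), depth, [])
  else (result, depth, current ++ [ch])

def split_shape_list (s : String) : List String :=
  if s = "" then []
  else
    let fin := s.toList.foldl pvStepA ([], 0, [])
    let token := PySem.Chars.strip fin.2.2
    if token ≠ [] then fin.1 ++ [String.ofList token] else fin.1

-- ===== PORT B =====
-- first pass of B: collect indices of depth-0 commas; state = (cuts, depth)
def pvStepB (st : List Int × Int) (p : Int × Char) : List Int × Int :=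
  let (cuts, depth) := st
  if p.2 = '[' then (cuts, depth + 1)
  else if p.2 = ']' then (cuts, depth - 1)
  else if p.2 = ',' ∧ depth = 0 then (cuts ++ [p.1], depth)
  else (cuts, depth)

-- second pass of B: slice between boundaries; state = (result, prev)
def pvStepB2 (w : List Char) (st : List String × Int) (c : Int) : List String × Int :=
  let (result, prev) := st
  let tok := PySem.Chars.strip (PySem.List.slice w (some (prev + 1)) (some c))  -- s[prev+1:c].strip()
  ((if tok ≠ [] then result ++ [String.ofList tok] else result), c)

def split_shape_list_alt (s : String) : List String :=
  -- len(s) ported as PySem.List.len s.toList (exact: the string's code-point count)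
  (((((PySem.List.enumerate s.toList 0).foldl pvStepB ([], 0)).1
      ++ [PySem.List.len s.toList]).foldl (pvStepB2 s.toList) ([], -1))).1

-- ===== PRECONDITION & SPEC =====
def Spec_split_shape_list (s : String) (out : List String) : Prop := out = split_shape_list_alt s
instance (s : String) (out : List String) : Decidable (Spec_split_shape_list s out) := by unfold Spec_split_shape_list; infer_instance

-- ===== CLAIM (what is proved, stated in full; the proofs are below) =====
def Claim_equal_split_shape_list : Prop := ∀ (s : String), Dom_split_shape_list s → Spec_split_shape_list s (split_shape_list s)

-- ===== LEMMAS AND PROOFS =====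

-- a stripped token contributed to the result (empty tokens contribute nothing)
def pvTok (l : List Char) : List String :=
  if PySem.Chars.strip l ≠ [] then [String.ofList (PySem.Chars.strip l)] else []

-- the raw segments between depth-0 commas, starting from depth d with buffer cur
def pvTokens (d : Int) (cur : List Char) : List Char → List (List Char)
  | [] => [cur]
  | c :: t =>
    if c = '[' then pvTokens (d+1) (cur ++ [c]) t
    else if c = ']' then pvTokens (d-1) (cur ++ [c]) t
    else if c = ',' ∧ d = 0 then cur :: pvTokens d [] t
    else pvTokens (d+0) (cur ++ [c]) t

def pvClean (ts : List (List Char)) : List String := ts.flatMap pvTok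

-- indices (as naturals) of depth-0 commas, counting from k
def pvCutsN (k : Nat) (d : Int) : List Char → List Nat
  | [] => []
  | c :: t =>
    if c = '[' then pvCutsN (k+1) (d+1) t
    else if c = ']' then pvCutsN (k+1) (d-1) t
    else if c = ',' ∧ d = 0 then k :: pvCutsN (k+1) d t
    else pvCutsN (k+1) (d+0) t

-- the tokens produced by slicing w at the given boundary list, current segment starting at p
def pvPieces (w : List Char) (p : Nat) : List Nat → List String
  | [] => []
  | c :: t => pvTok ((w.drop p).take (c - p)) ++ pvPieces w (c+1) t

theorem pvTok_if (r : List String) (cur : List Char) :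
    (if PySem.Chars.strip cur ≠ [] then r ++ [String.ofList (PySem.Chars.strip cur)] else r)
      = r ++ pvTok cur := by
  unfold pvTok; split <;> simp

theorem pvA_inv (l : List Char) :
    ∀ (res : List String) (d : Int) (cur : List Char),
      (l.foldl pvStepA (res, d, cur)).1 ++ pvTok (l.foldl pvStepA (res, d, cur)).2.2
        = res ++ pvClean (pvTokens d cur l) := by
  induction l with
  | nil => intro res d cur; simp [pvTokens, pvClean]
  | cons c t ih =>
    intro res d cur
    by_cases h1 : c = '['
    · simp [pvStepA, pvTokens, h1, ih]
    · by_cases h2 : c = ']'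
      · simp [pvStepA, pvTokens, h2, ih]
      · by_cases h3 : c = ',' ∧ d = 0
        · simp only [List.foldl_cons, pvStepA, if_neg h1, if_neg h2, if_pos h3,
            pvTokens, pvTok_if, ih, pvClean, List.flatMap_cons]
          simp [List.append_assoc]
        · simp [pvStepA, pvTokens, h1, h2, h3, ih]

theorem pvB_cuts (l : List Char) :
    ∀ (k : Nat) (d : Int) (acc : List Int),
      ((PySem.List.enumerate l (k : Int)).foldl pvStepB (acc, d)).1
        = acc ++ (pvCutsN k d l).map (fun n : Nat => (n : Int)) := by
  induction l with
  | nil => intro k d acc; simp [PySem.List.enumerate_nil, pvCutsN]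
  | cons c t ih =>
    intro k d acc
    have hk : (k : Int) + 1 = ((k + 1 : Nat) : Int) := by push_cast; ring
    rw [PySem.List.enumerate_cons]
    by_cases h1 : c = '['
    · simp only [List.foldl_cons, pvStepB, if_pos h1, pvCutsN]
      rw [hk, ih]
    · by_cases h2 : c = ']'
      · simp only [List.foldl_cons, pvStepB, if_neg h1, if_pos h2, pvCutsN]
        rw [hk, ih]
      · by_cases h3 : c = ',' ∧ d = 0
        · simp only [List.foldl_cons, pvStepB, if_neg h1, if_neg h2, if_pos h3, pvCutsN]
          rw [hk, ih]
          simp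
        · simp only [List.foldl_cons, pvStepB, if_neg h1, if_neg h2, if_neg h3, pvCutsN]
          rw [hk, ih]
          simp

theorem pvB_pieces (w : List Char) (cs : List Nat) :
    ∀ (p : Nat) (acc : List String),
      ((cs.map (fun n : Nat => (n : Int))).foldl (pvStepB2 w) (acc, (p : Int) - 1)).1
        = acc ++ pvPieces w p cs := by
  induction cs with
  | nil => intro p acc; simp [pvPieces]
  | cons c t ih =>
    intro p acc
    have hp : (p : Int) - 1 + 1 = (p : Int) := by ring
    have hc : (c : Int) = ((c + 1 : Nat) : Int) - 1 := by push_cast; ring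
    simp only [List.map_cons, List.foldl_cons, pvStepB2, hp, PySem.List.slice_natCast]
    rw [pvTok_if, hc, ih]
    simp [pvPieces, List.append_assoc]

theorem pv_core (l : List Char) :
    ∀ (w : List Char) (k j : Nat) (d : Int), j ≤ k → w.drop k = l →
      pvPieces w j (pvCutsN k d l ++ [k + l.length])
        = pvClean (pvTokens d ((w.drop j).take (k - j)) l) := by
  induction l with
  | nil =>
    intro w k j d hj hw
    simp [pvCutsN, pvPieces, pvTokens, pvClean]
  | cons c t ih =>
    intro w k j d hj hw
    have hw' : w.drop (k + 1) = t := by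
      have : w.drop (k+1) = (w.drop k).drop 1 := by rw [← List.drop_drop]
      rw [this, hw]; rfl
    have hgc : w[k]? = some c := by
      have h0 := congrArg (fun l : List Char => l[0]?) hw
      simpa [List.getElem?_drop] using h0
    have hcur : (w.drop j).take (k + 1 - j) = (w.drop j).take (k - j) ++ [c] := by
      have hkj : k + 1 - j = (k - j) + 1 := by omega
      rw [hkj, List.take_add_one]
      have : (w.drop j)[k - j]? = some c := by
        rw [List.getElem?_drop]
        have : j + (k - j) = k := by omega
        rw [this, hgc]
      rw [this]; rfl
    have hlen : k + (c :: t).length = (k + 1) + t.length := by simp; omega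
    by_cases h1 : c = '['
    · simp only [pvCutsN, pvTokens, if_pos h1, hlen]
      rw [ih w (k+1) j (d+1) (by omega) hw', hcur]
    · by_cases h2 : c = ']'
      · simp only [pvCutsN, pvTokens, if_neg h1, if_pos h2, hlen]
        rw [ih w (k+1) j (d-1) (by omega) hw', hcur]
      · by_cases h3 : c = ',' ∧ d = 0
        · simp only [pvCutsN, pvTokens, if_neg h1, if_neg h2, if_pos h3, hlen]
          simp only [List.cons_append, pvPieces, pvClean, List.flatMap_cons]
          rw [ih w (k+1) (k+1) d (by omega) hw']
          simp [pvClean]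
        · simp only [pvCutsN, pvTokens, if_neg h1, if_neg h2, if_neg h3, hlen]
          rw [ih w (k+1) j (d+0) (by omega) hw', hcur]

theorem pvA_eq (s : String) : split_shape_list s = pvClean (pvTokens 0 [] s.toList) := by
  by_cases hs : s = ""
  · subst hs
    decide
  · unfold split_shape_list
    rw [if_neg hs, pvTok_if]
    exact pvA_inv s.toList [] 0 []

theorem pvB_cuts0 (l : List Char) :
    ((PySem.List.enumerate l 0).foldl pvStepB ([], 0)).1
      = (pvCutsN 0 0 l).map (fun n : Nat => (n : Int)) :=
  pvB_cuts l 0 0 []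

theorem pvB_eq (s : String) : split_shape_list_alt s = pvClean (pvTokens 0 [] s.toList) := by
  unfold split_shape_list_alt
  rw [pvB_cuts0 s.toList]
  have hmap : (pvCutsN 0 0 s.toList).map (fun n : Nat => (n : Int)) ++ [PySem.List.len s.toList]
      = ((pvCutsN 0 0 s.toList ++ [0 + s.toList.length]).map (fun n : Nat => (n : Int))) := by simp
  have hneg : (([], -1) : List String × Int) = ([], ((0 : Nat) : Int) - 1) := by norm_num
  rw [hmap, hneg, pvB_pieces s.toList _ 0 [],
      pv_core s.toList s.toList 0 0 0 (le_refl 0) (by simp)]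
  simp

-- ===== VERDICT (by name: the statement is the Claim_ definition above) =====
theorem split_shape_list_spec : Claim_equal_split_shape_list := by
  intro s _
  unfold Spec_split_shape_list
  rw [pvA_eq, pvB_eq]
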